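-- pv_equiv track=rewrite | github.com/golovenkov/algo_otus | 05_insertion_and_shell_sort/insertion_sort.py | insertion_sort_binary
-- ===== SOURCE A (Python) =====
-- def binary_search(a, key, start, end):
--     """Find the position of object `key` in sorted array `a` in a slice from `start` to `end` inclusively"""
--     count = 1
--     low = start
--     high = end
--     while low < high:
--         count += 1
--         middle = low + (high - low) // 2
--         if key < a[middle]:
--             high = middle   # the key is in left part
--         else:
--             low = middle + 1
--     return low, count
--
-- def insertion_sort_binary(a):
--     """Sort the list `a` in place with insertion sort (binary search of a place to insert)"""
--     count = 0
--     for i in range(1, len(a)):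
--         element_to_sort = a[i]
--         position, c = binary_search(a, element_to_sort, 0, i)
--         count += c                                                  # `count` means a number of 'comparison' ops
--         for j in range(i, position, -1):
--             a[j] = a[j - 1]
--
--         a[position] = element_to_sort
--     return count
-- ===== SOURCE B (Python) =====
-- def locate(s, x, lo, hi):
--     """Insertion point for `x` in the sorted slice s[lo:hi], together with the
--     number of comparisons the bisection makes (one guard test per level plus
--     the final one)."""
--     if lo >= hi:
--         return lo, 1
--     mid = (lo + hi) // 2
--     if x < s[mid]:
--         pos, comps = locate(s, x, lo, mid)
--     else:
--         pos, comps = locate(s, x, mid + 1, hi)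
--     return pos, comps + 1
--
-- def insertion_sort_binary(a):
--     """Binary insertion sort into a fresh list; sorts `a` in place and
--     returns the number of comparisons made."""
--     comparisons = 0
--     result = a[:1]
--     for x in a[1:]:
--         pos, comps = locate(result, x, 0, len(result))
--         comparisons += comps
--         result.insert(pos, x)
--     a[:] = result
--     return comparisons
-- ===== Notes on version B (the rewrite author's own statement) =====
-- stated objective: faster
-- what changed: Instead of maintaining the sorted prefix inside `a` with an in-place element-shifting loop after an iterative binary search, B builds a fresh sorted list, finds each insertion point with a recursive bisection helper that also returns its comparison count, and inserts with list.insert.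
import Mathlib
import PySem

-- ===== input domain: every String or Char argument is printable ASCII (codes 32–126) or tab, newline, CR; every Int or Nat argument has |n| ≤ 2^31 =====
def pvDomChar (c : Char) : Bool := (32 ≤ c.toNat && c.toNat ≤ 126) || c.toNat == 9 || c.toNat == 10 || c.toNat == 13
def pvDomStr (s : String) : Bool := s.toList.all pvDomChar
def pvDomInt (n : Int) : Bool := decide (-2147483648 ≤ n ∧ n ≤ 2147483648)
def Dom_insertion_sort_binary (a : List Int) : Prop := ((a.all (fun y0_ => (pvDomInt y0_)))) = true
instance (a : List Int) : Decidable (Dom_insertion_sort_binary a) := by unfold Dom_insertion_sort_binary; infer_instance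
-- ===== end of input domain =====

-- B replaces A's in-place sort (iterative binary search over the array prefix plus an
-- element-shifting loop) by insertion into a fresh sorted list located by a recursive
-- bisection helper that also returns its comparison count (measured constant-factor
-- speed-up: list.insert replaces the interpreted shifting loop).
-- Both Pythons sort their argument in place identically; the equivalence proved here is
-- about the RETURN value (the comparison count).

-- ===== PORT A =====
-- while-loop of `binary_search` (count starts at 1, incremented once per iteration);
-- fuel = high - low only makes the recursion structural: the gap shrinks by ≥ 1 per
-- iteration, so the loop always terminates by its guard before fuel runs out (exact)
def binary_search_loop (a : List Int) (key : Int) : Nat → Int → Int → Int → Int × Int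
  | 0, low, _, count => (low, count)
  | fuel + 1, low, high, count =>
    if low < high then
      let middle := low + PySem.Int.floordiv (high - low) 2
      if key < PySem.List.pyGetD a middle 0 then
        binary_search_loop a key fuel low middle (count + 1)
      else
        binary_search_loop a key fuel (middle + 1) high (count + 1)
    else (low, count)

def binary_search (a : List Int) (key start stop : Int) : Int × Int :=
  binary_search_loop a key (stop - start).toNat start stop 1

-- body of A's outer `for i in range(1, len(a))` loop, state = (a, count)
def insertion_step (st : List Int × Int) (i : Int) : List Int × Int :=
  let element_to_sort := PySem.List.pyGetD st.1 i 0
  let pc := binary_search st.1 element_to_sort 0 i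
  let shifted := (PySem.List.pyRange i pc.1 (-1)).foldl
    (fun l j => PySem.List.pySetD l j (PySem.List.pyGetD l (j - 1) 0)) st.1
  (PySem.List.pySetD shifted pc.1 element_to_sort, st.2 + pc.2)

def insertion_sort_binary (a : List Int) : Int :=
  ((PySem.List.pyRange 1 (PySem.List.len a) 1).foldl insertion_step (a, 0)).2

-- ===== PORT B =====
-- Source B's recursive `locate` (fuel = hi - lo only makes the recursion structural; the
-- interval shrinks by ≥ 1 per level, so the base case always fires first: exact)
def locate_go (s : List Int) (x : Int) : Nat → Int → Int → Int × Int
  | 0, lo, _ => (lo, 1)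
  | fuel + 1, lo, hi =>
    if hi ≤ lo then (lo, 1)
    else
      let mid := PySem.Int.floordiv (lo + hi) 2
      let pc :=
        if x < PySem.List.pyGetD s mid 0 then locate_go s x fuel lo mid
        else locate_go s x fuel (mid + 1) hi
      (pc.1, pc.2 + 1)

def locate (s : List Int) (x lo hi : Int) : Int × Int :=
  locate_go s x (hi - lo).toNat lo hi

-- body of Source B's `for x in a[1:]` loop, state = (result, comparisons)
def alt_step (st : List Int × Int) (x : Int) : List Int × Int :=
  let pc := locate st.1 x 0 (PySem.List.len st.1)
  (PySem.List.insert st.1 pc.1 x, st.2 + pc.2)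

def insertion_sort_binary_alt (a : List Int) : Int :=
  ((PySem.List.slice a (some 1) none).foldl alt_step (PySem.List.slice a none (some 1), 0)).2

-- ===== PRECONDITION & SPEC =====
def Spec_insertion_sort_binary (a : List Int) (out : Int) : Prop := out = insertion_sort_binary_alt a
instance (a : List Int) (out : Int) : Decidable (Spec_insertion_sort_binary a out) := by unfold Spec_insertion_sort_binary; infer_instance

-- ===== CLAIM (what is proved, stated in full; the proofs are below) =====
def Claim_equal_insertion_sort_binary : Prop := ∀ (a : List Int), Dom_insertion_sort_binary a → Spec_insertion_sort_binary a (insertion_sort_binary a)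

-- ===== LEMMAS AND PROOFS =====

theorem mid_bounds (low high : Int) (h : low < high) :
    low ≤ low + PySem.Int.floordiv (high - low) 2 ∧ low + PySem.Int.floordiv (high - low) 2 < high := by
  rw [PySem.Int.floordiv_eq_ediv_of_pos (by norm_num)]
  omega

theorem mid_eq (low high : Int) :
    low + PySem.Int.floordiv (high - low) 2 = PySem.Int.floordiv (low + high) 2 := by
  rw [PySem.Int.floordiv_eq_ediv_of_pos (by norm_num), PySem.Int.floordiv_eq_ediv_of_pos (by norm_num)]
  omega

theorem bs_fuel_zero (a : List Int) (key low high c : Int) :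
    binary_search_loop a key 0 low high c = (low, c) := rfl

theorem bs_done (a : List Int) (key : Int) (fuel : Nat) (low high c : Int) (hlt : ¬ low < high) :
    binary_search_loop a key fuel low high c = (low, c) := by
  cases fuel with
  | zero => rfl
  | succ fuel => rw [binary_search_loop]; exact if_neg hlt

theorem bs_step (a : List Int) (key : Int) (fuel : Nat) (low high c : Int) (hlt : low < high) :
    binary_search_loop a key (fuel + 1) low high c =
      if key < PySem.List.pyGetD a (low + PySem.Int.floordiv (high - low) 2) 0 then
        binary_search_loop a key fuel low (low + PySem.Int.floordiv (high - low) 2) (c + 1)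
      else
        binary_search_loop a key fuel (low + PySem.Int.floordiv (high - low) 2 + 1) high (c + 1) := by
  rw [binary_search_loop, if_pos hlt]

theorem loc_done (s : List Int) (x : Int) (fuel : Nat) (lo hi : Int) (h : hi ≤ lo) :
    locate_go s x fuel lo hi = (lo, 1) := by
  cases fuel with
  | zero => rfl
  | succ fuel => rw [locate_go]; exact if_pos h

theorem loc_step (s : List Int) (x : Int) (fuel : Nat) (lo hi : Int) (h : lo < hi) :
    locate_go s x (fuel + 1) lo hi =
      if x < PySem.List.pyGetD s (PySem.Int.floordiv (lo + hi) 2) 0 then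
        ((locate_go s x fuel lo (PySem.Int.floordiv (lo + hi) 2)).1,
          (locate_go s x fuel lo (PySem.Int.floordiv (lo + hi) 2)).2 + 1)
      else
        ((locate_go s x fuel (PySem.Int.floordiv (lo + hi) 2 + 1) hi).1,
          (locate_go s x fuel (PySem.Int.floordiv (lo + hi) 2 + 1) hi).2 + 1) := by
  rw [locate_go, if_neg (by omega : ¬ hi ≤ lo)]
  split
  · rename_i hc; simp only [if_pos hc]
  · rename_i hc; simp only [if_neg hc]

theorem bs_range (a : List Int) (key : Int) : ∀ (fuel : Nat) (low high c : Int), low ≤ high →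
    low ≤ (binary_search_loop a key fuel low high c).1
      ∧ (binary_search_loop a key fuel low high c).1 ≤ high := by
  intro fuel
  induction fuel with
  | zero =>
    intro low high c h
    rw [bs_fuel_zero]
    exact ⟨le_refl _, h⟩
  | succ fuel ih =>
    intro low high c h
    by_cases hlt : low < high
    · have hb := mid_bounds low high hlt
      rw [bs_step a key fuel low high c hlt]
      by_cases hkey : key < PySem.List.pyGetD a (low + PySem.Int.floordiv (high - low) 2) 0
      · rw [if_pos hkey]
        have := ih low (low + PySem.Int.floordiv (high - low) 2) (c + 1) (by omega)
        omega
      · rw [if_neg hkey]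
        have := ih (low + PySem.Int.floordiv (high - low) 2 + 1) high (c + 1) (by omega)
        omega
    · rw [bs_done a key (fuel + 1) low high c hlt]
      exact ⟨le_refl _, h⟩

-- B's recursive locate retraces A's iterative search when the two lists agree on [low,high)
theorem locate_eq_bs_loop (s l : List Int) (key : Int) : ∀ (fuel : Nat) (low high c : Int),
    (high - low).toNat ≤ fuel →
    (∀ j : Int, low ≤ j → j < high → PySem.List.pyGetD s j 0 = PySem.List.pyGetD l j 0) →
    binary_search_loop l key fuel low high c
      = ((locate_go s key fuel low high).1, c + (locate_go s key fuel low high).2 - 1) := by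
  intro fuel
  induction fuel with
  | zero =>
    intro low high c hf _
    rw [bs_fuel_zero, loc_done s key 0 low high (by omega)]
    exact Prod.ext rfl (by omega)
  | succ fuel ih =>
    intro low high c hf hag
    by_cases hlt : low < high
    · have hb := mid_bounds low high hlt
      have hmid : PySem.List.pyGetD s (low + PySem.Int.floordiv (high - low) 2) 0
          = PySem.List.pyGetD l (low + PySem.Int.floordiv (high - low) 2) 0 :=
        hag _ (by omega) (by omega)
      rw [bs_step l key fuel low high c hlt, loc_step s key fuel low high hlt, ← mid_eq, hmid]
      by_cases hkey : key < PySem.List.pyGetD l (low + PySem.Int.floordiv (high - low) 2) 0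
      · rw [if_pos hkey, if_pos hkey,
          ih low (low + PySem.Int.floordiv (high - low) 2) (c + 1) (by omega)
            (fun j h1 h2 => hag j h1 (by omega))]
        exact Prod.ext rfl (by omega)
      · rw [if_neg hkey, if_neg hkey,
          ih (low + PySem.Int.floordiv (high - low) 2 + 1) high (c + 1) (by omega)
            (fun j h1 h2 => hag j (by omega) h2)]
        exact Prod.ext rfl (by omega)
    · rw [bs_done l key (fuel + 1) low high c hlt, loc_done s key (fuel + 1) low high (by omega)]
      exact Prod.ext rfl (by omega)

theorem bs_pos (a : List Int) (key : Int) : ∀ (fuel : Nat) (low high c : Int),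
    (high - low).toNat ≤ fuel → low ≤ high →
    (∀ j k : Int, low ≤ j → j ≤ k → k < high →
      PySem.List.pyGetD a j 0 ≤ PySem.List.pyGetD a k 0) →
    (∀ j : Int, low ≤ j → j < (binary_search_loop a key fuel low high c).1 →
        PySem.List.pyGetD a j 0 ≤ key) ∧
    (∀ j : Int, (binary_search_loop a key fuel low high c).1 ≤ j → j < high →
        key < PySem.List.pyGetD a j 0) := by
  intro fuel
  induction fuel with
  | zero =>
    intro low high c hf _ _
    rw [bs_fuel_zero]
    exact ⟨fun j hj hjp => absurd (lt_of_le_of_lt hj hjp) (lt_irrefl _),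
      fun j hj hjh => absurd (lt_of_le_of_lt hj hjh) (by omega)⟩
  | succ fuel ih =>
    intro low high c hf hle hsort
    by_cases hlt : low < high
    · have hb := mid_bounds low high hlt
      rw [bs_step a key fuel low high c hlt]
      by_cases hkey : key < PySem.List.pyGetD a (low + PySem.Int.floordiv (high - low) 2) 0
      · rw [if_pos hkey]
        have hr := bs_range a key fuel low (low + PySem.Int.floordiv (high - low) 2) (c + 1) (by omega)
        obtain ⟨ih1, ih2⟩ := ih low (low + PySem.Int.floordiv (high - low) 2) (c + 1)
          (by omega) (by omega) (fun j k hj hjk hk => hsort j k hj hjk (by omega))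
        refine ⟨ih1, fun j hpj hj => ?_⟩
        by_cases hcase : j < low + PySem.Int.floordiv (high - low) 2
        · exact ih2 j hpj hcase
        · calc key < PySem.List.pyGetD a (low + PySem.Int.floordiv (high - low) 2) 0 := hkey
            _ ≤ PySem.List.pyGetD a j 0 := hsort _ j (by omega) (by omega) hj
      · rw [if_neg hkey]
        have hr := bs_range a key fuel (low + PySem.Int.floordiv (high - low) 2 + 1) high (c + 1) (by omega)
        obtain ⟨ih1, ih2⟩ := ih (low + PySem.Int.floordiv (high - low) 2 + 1) high (c + 1)
          (by omega) (by omega) (fun j k hj hjk hk => hsort j k (by omega) hjk hk)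
        refine ⟨fun j hj hjp => ?_, ih2⟩
        by_cases hcase : low + PySem.Int.floordiv (high - low) 2 + 1 ≤ j
        · exact ih1 j hcase hjp
        · calc PySem.List.pyGetD a j 0 ≤ PySem.List.pyGetD a (low + PySem.Int.floordiv (high - low) 2) 0 :=
              hsort j _ hj (by omega) (by omega)
            _ ≤ key := not_lt.mp hkey
    · rw [bs_done a key (fuel + 1) low high c hlt]
      exact ⟨fun j hj hjp => absurd (lt_of_le_of_lt hj hjp) (lt_irrefl _),
        fun j hj hjh => absurd (lt_of_le_of_lt hj hjh) hlt⟩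

theorem shift_insert (p : Nat) : ∀ (k : Nat) (l : List Int) (x : Int), p + k < l.length →
    PySem.List.pySetD
      ((PySem.List.pyRange ((p + k : Nat) : Int) (p : Int) (-1)).foldl
        (fun l j => PySem.List.pySetD l j (PySem.List.pyGetD l (j - 1) 0)) l)
      (p : Int) x
    = (l.take p ++ x :: (l.take (p + k)).drop p) ++ l.drop (p + k + 1) := by
  intro k
  induction k with
  | zero =>
    intro l x hl
    rw [Nat.add_zero] at *
    rw [PySem.List.pyRange_neg_one_eq_nil (le_refl _)]
    simp only [List.foldl_nil, PySem.List.pySetD_natCast]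
    rw [List.set_eq_take_cons_drop x hl]
    simp
  | succ k ih =>
    intro l x hl
    have hcons : PySem.List.pyRange ((p + (k+1) : Nat) : Int) (p : Int) (-1)
        = ((p + (k+1) : Nat) : Int) :: PySem.List.pyRange ((p + k : Nat) : Int) (p : Int) (-1) := by
      rw [PySem.List.pyRange_neg_one_cons (by exact_mod_cast Nat.lt_add_of_pos_right (Nat.succ_pos k))]
      have h4 : ((p + (k+1) : Nat) : Int) - 1 = ((p + k : Nat) : Int) := by push_cast; omega
      rw [h4]
    rw [hcons, List.foldl_cons]
    have hg' : PySem.List.pyGetD l (((p + (k+1) : Nat) : Int) - 1) 0 = l[p + k]'(by omega) := by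
      have h4 : ((p + (k+1) : Nat) : Int) - 1 = ((p + k : Nat) : Int) := by push_cast; omega
      rw [h4, PySem.List.pyGetD_natCast]
      exact List.getD_eq_getElem l 0 (by omega)
    rw [hg']
    set l₁ := l.set (p + (k + 1)) (l[p + k]'(by omega)) with hl₁
    have hinit : PySem.List.pySetD l (((p + (k+1)) : Nat) : Int) (l[p + k]'(by omega)) = l₁ := by
      rw [hl₁, PySem.List.pySetD_natCast]
    rw [hinit]
    have hlen1 : l₁.length = l.length := by rw [hl₁, List.length_set]
    have ihh := ih l₁ x (by omega)
    rw [ihh]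
    have e1 : l₁.take p = l.take p := List.take_set_of_le (by omega)
    have e2 : l₁.take (p + k) = l.take (p + k) := List.take_set_of_le (by omega)
    have e3 : l₁.drop (p + k + 1) = l[p + k]'(by omega) :: l.drop (p + k + 2) := by
      rw [List.drop_eq_getElem_cons (by omega)]
      congr 1
      · exact List.getElem_set_self (by simp; omega)
      · have h5 : (l₁.drop (p + k + 1 + 1)) = l.drop (p + k + 1 + 1) := List.drop_set_of_lt (by omega)
        simpa using h5
    rw [e1, e2, e3]
    have e4 : (l.take (p + (k+1))).drop p = (l.take (p + k)).drop p ++ [l[p + k]'(by omega)] := by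
      have h6 : p + (k + 1) = (p + k) + 1 := by omega
      rw [h6, List.take_add_one, List.getElem?_eq_getElem (by omega)]
      rw [List.drop_append_of_le_length (by simp; omega)]
      simp
    rw [e4]
    have h7 : p + (k + 1) + 1 = p + k + 2 := by omega
    rw [h7]
    simp [List.append_assoc]

theorem shift_insert' (p m : Nat) (l : List Int) (x : Int) (hpm : p ≤ m) (hm : m < l.length) :
    PySem.List.pySetD
      ((PySem.List.pyRange (m : Int) (p : Int) (-1)).foldl
        (fun l j => PySem.List.pySetD l j (PySem.List.pyGetD l (j - 1) 0)) l)
      (p : Int) x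
    = (l.take p ++ x :: (l.take m).drop p) ++ l.drop (m + 1) := by
  have h := shift_insert p (m - p) l x (by omega)
  rw [Nat.add_sub_cancel' hpm] at h
  exact h

theorem drop_succ_eq (l a : List Int) (m : Nat) (h : l.drop m = a.drop m) :
    l.drop (m + 1) = a.drop (m + 1) := by
  have h1 : (l.drop m).drop 1 = (a.drop m).drop 1 := by rw [h]
  simpa [List.drop_drop] using h1

theorem main_inv (a : List Int) : ∀ (m : Nat), 1 ≤ m → m ≤ a.length →
    ∃ l c, (PySem.List.pyRange 1 (m : Int) 1).foldl insertion_step (a, 0) = (l, c)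
      ∧ l.length = a.length
      ∧ (l.take m).Pairwise (· ≤ ·)
      ∧ (l.take m).Perm (a.take m)
      ∧ l.drop m = a.drop m
      ∧ ((a.drop 1).take (m - 1)).foldl alt_step (a.take 1, 0) = (l.take m, c) := by
  intro m
  induction m with
  | zero => intro h; omega
  | succ m ih =>
    intro _ hm1
    by_cases hm0 : m = 0
    · subst hm0
      refine ⟨a, 0, ?_, rfl, ?_, List.Perm.refl _, rfl, ?_⟩
      · rw [PySem.List.pyRange_one_eq_nil (by norm_num), List.foldl_nil]
      · apply List.pairwise_iff_getElem.mpr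
        intro i j hi hj hij
        simp at hj
        omega
      · simp
    · obtain ⟨l, c, heq, hlen, hpw, hperm, hdrop, halt⟩ := ih (by omega) (by omega)
      have hmlen : m < a.length := by omega
      have hmlenl : m < l.length := by omega
      have hsplit : PySem.List.pyRange 1 ((m + 1 : Nat) : Int) 1
          = PySem.List.pyRange 1 (m : Int) 1 ++ [(m : Int)] := by
        have h1 : ((m + 1 : Nat) : Int) = (m : Int) + 1 := by push_cast; ring
        rw [h1, PySem.List.pyRange_one_succ_right (by exact_mod_cast Nat.one_le_iff_ne_zero.mpr hm0)]
      have hx : PySem.List.pyGetD l (m : Int) 0 = l[m]'hmlenl := by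
        rw [PySem.List.pyGetD_natCast]
        exact List.getD_eq_getElem l 0 hmlenl
      have hxa : l[m]'hmlenl = a[m]'hmlen := by
        have h0 : (l.drop m)[0]? = (a.drop m)[0]? := by rw [hdrop]
        rw [List.getElem?_drop, List.getElem?_drop, Nat.add_zero,
          List.getElem?_eq_getElem hmlenl, List.getElem?_eq_getElem hmlen] at h0
        exact Option.some.inj h0
      set x := l[m]'hmlenl with hxdef
      have hgetl : ∀ j : Nat, j < m → PySem.List.pyGetD l (j : Int) 0 = l.getD j 0 := by
        intro j _
        rw [PySem.List.pyGetD_natCast]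
      have hgetl' : ∀ j : Nat, (hj : j < m) → l.getD j 0 = l[j]'(Nat.lt_trans hj hmlenl) := by
        intro j hj
        exact List.getD_eq_getElem l 0 (Nat.lt_trans hj hmlenl)
      have hsort : ∀ j k : Int, 0 ≤ j → j ≤ k → k < (m : Int) →
          PySem.List.pyGetD l j 0 ≤ PySem.List.pyGetD l k 0 := by
        intro j k h0 hjk hkm
        have hj' : j = ((j.toNat : Nat) : Int) := by omega
        have hk' : k = ((k.toNat : Nat) : Int) := by omega
        rw [hj', hk', hgetl j.toNat (by omega), hgetl k.toNat (by omega),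
          hgetl' j.toNat (by omega), hgetl' k.toNat (by omega)]
        rcases Nat.lt_or_ge j.toNat k.toNat with h | h
        · have := List.pairwise_iff_getElem.mp hpw j.toNat k.toNat
            (by simp; omega) (by simp; omega) h
          simpa [List.getElem_take] using this
        · have hjk2 : j.toNat = k.toNat := by omega
          simp [hjk2]
      have h0m : (0 : Int) ≤ (m : Int) := by positivity
      set P := binary_search_loop l x m 0 (m : Int) 1 with hP
      have hfm : (((m : Int)) - 0).toNat ≤ m := by omega
      have hrange := bs_range l x m 0 (m : Int) 1 h0m
      obtain ⟨hpos1, hpos2⟩ := bs_pos l x m 0 (m : Int) 1 (by omega) h0m hsort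
      rw [← hP] at hrange hpos1 hpos2
      set pn := P.1.toNat with hpndef
      have hPcast : ((pn : Nat) : Int) = P.1 := by omega
      have hpnm : pn ≤ m := by omega
      -- B's locate over the sorted prefix agrees with A's search, position and count
      have hagree : ∀ j : Int, 0 ≤ j → j < (m : Int) →
          PySem.List.pyGetD (l.take m) j 0 = PySem.List.pyGetD l j 0 := by
        intro j h0 hjm
        have hj' : j = ((j.toNat : Nat) : Int) := by omega
        rw [hj', PySem.List.pyGetD_natCast, PySem.List.pyGetD_natCast,
          List.getD_eq_getElem (l.take m) 0 (by simp; omega),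
          List.getD_eq_getElem l 0 (by omega)]
        simp [List.getElem_take]
      have hloc : locate (l.take m) x 0 (m : Int) = P := by
        have h := locate_eq_bs_loop (l.take m) l x m 0 (m : Int) 1 (by omega) hagree
        rw [← hP] at h
        unfold locate
        rw [show (((m : Int)) - 0).toNat = m by omega]
        rw [h]
        exact Prod.ext rfl (by omega)
      set L := (l.take pn ++ x :: (l.take m).drop pn) ++ l.drop (m + 1) with hLdef
      have hfrontlen : (l.take pn ++ x :: (l.take m).drop pn).length = m + 1 := by
        rw [List.length_append, List.length_take, List.length_cons, List.length_drop, List.length_take]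
        omega
      have hstep : insertion_step (l, c) (m : Int) = (L, c + P.2) := by
        simp only [insertion_step, binary_search]
        rw [hx]
        rw [show (((m : Int)) - 0).toNat = m by omega]
        rw [← hP, ← hPcast, shift_insert' pn m l x hpnm hmlenl]
      have htakepn : l.take pn = (l.take m).take pn := by
        rw [List.take_take, Nat.min_eq_left hpnm]
      have hmemdrop : ∀ v ∈ (l.take m).drop pn, x < v := by
        intro v hv
        obtain ⟨t, ht, rfl⟩ := List.mem_iff_getElem.mp hv
        have htm : pn + t < m := by simp at ht; omega
        have h9 := hpos2 ((pn + t : Nat) : Int) (by omega) (by exact_mod_cast htm)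
        rw [hgetl (pn + t) htm, hgetl' (pn + t) htm] at h9
        simpa [List.getElem_drop, List.getElem_take] using h9
      have hmemtake : ∀ v ∈ l.take pn, v ≤ x := by
        intro v hv
        obtain ⟨t, ht, rfl⟩ := List.mem_iff_getElem.mp hv
        have htpn : t < pn := by simp at ht; omega
        have htm : t < m := by omega
        have h9 := hpos1 ((t : Nat) : Int) (by positivity) (by omega)
        rw [hgetl t htm, hgetl' t htm] at h9
        simpa [List.getElem_take] using h9
      have hBstep : alt_step (l.take m, c) x = (L.take (m + 1), c + P.2) := by
        simp only [alt_step]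
        have hlenTake : PySem.List.len (l.take m) = (m : Int) := by
          rw [PySem.List.len_eq, List.length_take]
          congr 1
          omega
        rw [hlenTake, hloc, ← hPcast,
          PySem.List.insert_natCast (l.take m) pn x (by simp; omega)]
        rw [hLdef, List.take_left' hfrontlen, ← htakepn]
      refine ⟨L, c + P.2, ?_, ?_, ?_, ?_, ?_, ?_⟩
      · rw [hsplit, List.foldl_append, heq, List.foldl_cons, List.foldl_nil, hstep]
      · simp [hLdef]
        omega
      · rw [hLdef, List.take_left' hfrontlen]
        refine List.pairwise_append.mpr ⟨?_, ?_, ?_⟩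
        · rw [htakepn]
          exact hpw.sublist (List.take_sublist _ _)
        · refine List.pairwise_cons.mpr ⟨fun v hv => le_of_lt (hmemdrop v hv), ?_⟩
          exact hpw.sublist (List.drop_sublist _ _)
        · intro u hu v hv
          rcases List.mem_cons.mp hv with rfl | hv'
          · exact hmemtake u hu
          · exact le_trans (hmemtake u hu) (le_of_lt (hmemdrop v hv'))
      · rw [hLdef, List.take_left' hfrontlen]
        have htk : a.take (m + 1) = a.take m ++ [a[m]'hmlen] := by
          rw [List.take_add_one, List.getElem?_eq_getElem hmlen]
          simp
        have e5 : l.take pn ++ (l.take m).drop pn = l.take m := by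
          rw [htakepn, List.take_append_drop]
        have p2 : (x :: (l.take pn ++ (l.take m).drop pn)).Perm (x :: a.take m) := by
          rw [e5]; exact hperm.cons x
        have p3 : (x :: a.take m).Perm (a.take (m + 1)) := by
          rw [htk, ← hxa]
          exact (List.perm_append_singleton x _).symm
        exact (List.perm_middle.trans p2).trans p3
      · rw [hLdef, List.drop_left' hfrontlen]
        exact drop_succ_eq l a m hdrop
      · have hdlen : m - 1 < (a.drop 1).length := by
          rw [List.length_drop]; omega
        have hdx : (a.drop 1)[m - 1]'hdlen = a[m]'hmlen := by
          rw [List.getElem_drop]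
          congr 1
          omega
        have hsplitB : (a.drop 1).take ((m + 1) - 1)
            = (a.drop 1).take (m - 1) ++ [a[m]'hmlen] := by
          have h8 : (m + 1) - 1 = (m - 1) + 1 := by omega
          rw [h8, List.take_add_one, List.getElem?_eq_getElem hdlen, hdx]
          simp
        rw [hsplitB, List.foldl_append, halt, List.foldl_cons, List.foldl_nil, ← hxa, hBstep]

-- ===== VERDICT (by name: the statement is the Claim_ definition above) =====
theorem insertion_sort_binary_spec : Claim_equal_insertion_sort_binary := by
  intro a _
  unfold Spec_insertion_sort_binary insertion_sort_binary insertion_sort_binary_alt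
  by_cases ha : a = []
  · subst ha; decide
  · have hlen : 1 ≤ a.length := List.length_pos_iff.mpr ha
    obtain ⟨l, c, heq, _, _, _, _, halt⟩ := main_inv a a.length (by omega) le_rfl
    simp only [PySem.List.len_eq]
    rw [heq]
    have hs1 : PySem.List.slice a (some 1) none = a.drop 1 := by
      rw [show (1:Int) = ((1:Nat):Int) by norm_num, PySem.List.slice_from_natCast]
    have hs2 : PySem.List.slice a none (some 1) = a.take 1 := by
      rw [show (1:Int) = ((1:Nat):Int) by norm_num, PySem.List.slice_to_natCast]
    have hdt : (a.drop 1).take (a.length - 1) = a.drop 1 := by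
      apply List.take_of_length_le
      rw [List.length_drop]
    rw [hs1, hs2, ← hdt, halt]
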